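-- pv_equiv track=rewrite | github.com/KwongFuk/ainet | scripts/bootstrap_ainet.py | display_cmd
-- ===== SOURCE A (Python) =====
-- def display_cmd(cmd: list[str]) -> str:
--     parts: list[str] = []
--     redact_next = False
--     for part in cmd:
--         if redact_next:
--             parts.append("[redacted]")
--             redact_next = False
--             continue
--         parts.append(part)
--         if part == "--relay-token":
--             redact_next = True
--     return " ".join(parts)
-- ===== SOURCE B (Python) =====
-- def display_cmd(cmd: list[str]) -> str:
--     # Run-length approach: scan maximal runs of "--relay-token" and emit the
--     # alternating token/[redacted] pattern by arithmetic on the run's parity.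
--     T = "--relay-token"
--     out: list[str] = []
--     i, n = 0, len(cmd)
--     while i < n:
--         if cmd[i] != T:
--             out.append(cmd[i])
--             i += 1
--         else:
--             j = i
--             while j < n and cmd[j] == T:
--                 j += 1
--             r = j - i
--             out += [T, "[redacted]"] * (r // 2)
--             if r % 2:
--                 out.append(T)
--                 if j < n:
--                     out.append("[redacted]")
--                     j += 1
--             i = j
--     return " ".join(out)
-- ===== Notes on version B (the rewrite author's own statement) =====
-- stated objective: alternative
-- what changed: Instead of a per-element pass carrying a redact_next flag, B scans each maximal run of --relay-token at once and emits the alternating token/[redacted] pattern arithmetically from the run length's parity (list repetition [T,'[redacted]']*(r//2) plus the odd remainder), redacting the element after an odd run.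
import Mathlib
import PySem

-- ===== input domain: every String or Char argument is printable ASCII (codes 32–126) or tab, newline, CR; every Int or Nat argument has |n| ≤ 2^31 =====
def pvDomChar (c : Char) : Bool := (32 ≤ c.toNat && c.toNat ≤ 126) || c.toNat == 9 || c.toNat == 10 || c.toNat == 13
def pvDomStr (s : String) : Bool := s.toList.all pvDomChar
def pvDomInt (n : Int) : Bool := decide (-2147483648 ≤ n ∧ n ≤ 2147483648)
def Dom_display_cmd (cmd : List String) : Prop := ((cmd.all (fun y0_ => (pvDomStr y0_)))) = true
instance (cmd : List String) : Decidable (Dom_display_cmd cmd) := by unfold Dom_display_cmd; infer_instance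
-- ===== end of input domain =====

-- B replaces A's per-element skip-flag pass by run-length chunking: it scans each
-- maximal run of "--relay-token" and emits the alternating token/[redacted]
-- pattern from the run's length parity (alternative decomposition; same cost).


-- ===== PORT A =====
-- loop body of A: state = (parts, redact_next)
def displayCmdStep (st : List String × Bool) (part : String) : List String × Bool :=
  if st.2 then (st.1 ++ ["[redacted]"], false)
  else if part == "--relay-token" then (st.1 ++ [part], true)
  else (st.1 ++ [part], false)

def display_cmd (cmd : List String) : String :=
  PySem.Str.join " " (cmd.foldl displayCmdStep ([], false)).1

-- ===== PORT B =====
-- Source B's inner `while j < n and cmd[j] == T: j += 1` scan: split off the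
-- leading run of tokens, returning (run length, remainder).
def runSplit : List String → Nat × List String
  | [] => (0, [])
  | p :: rest =>
    if p == "--relay-token" then
      let rs := runSplit rest
      (rs.1 + 1, rs.2)
    else (0, p :: rest)

theorem runSplit_len_le : ∀ l : List String, (runSplit l).2.length ≤ l.length := by
  intro l
  induction l with
  | nil => simp [runSplit]
  | cons p rest ih =>
    by_cases h : p = "--relay-token" <;> simp [runSplit, h] <;> omega

-- Python's `[T, "[redacted]"] * k` (list repetition)
def pyListMul (l : List String) (k : Nat) : List String := (List.replicate k l).flatten

-- Source B's outer while loop over the remaining suffix of cmd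
def altGo : List String → List String
  | [] => []
  | p :: rest =>
    if p == "--relay-token" then
      let rs := runSplit rest
      let r := rs.1 + 1
      pyListMul ["--relay-token", "[redacted]"] (r / 2) ++
        (if r % 2 == 1 then
          "--relay-token" ::
            (match h : rs.2 with
             | [] => []
             | _ :: t => "[redacted]" :: altGo t)
         else altGo rs.2)
    else p :: altGo rest
termination_by l => l.length
decreasing_by
  · have := runSplit_len_le rest
    rw [h] at this; simp at this ⊢; omega
  · have := runSplit_len_le rest
    simp; omega
  · simp

def display_cmd_alt (cmd : List String) : String :=
  PySem.Str.join " " (altGo cmd)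

-- ===== PRECONDITION & SPEC =====
def Spec_display_cmd (cmd : List String) (out : String) : Prop := out = display_cmd_alt cmd
instance (cmd : List String) (out : String) : Decidable (Spec_display_cmd cmd out) := by unfold Spec_display_cmd; infer_instance

-- ===== CLAIM (what is proved, stated in full; the proofs are below) =====
def Claim_equal_display_cmd : Prop := ∀ (cmd : List String), Dom_display_cmd cmd → Spec_display_cmd cmd (display_cmd cmd)

-- ===== LEMMAS AND PROOFS =====
-- proof-side characterisation of A's fold (false / true redact state)
def aParts : List String → List String
  | [] => []
  | p :: rest =>
    if p == "--relay-token" then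
      p :: (match rest with
            | [] => []
            | _ :: r => "[redacted]" :: aParts r)
    else p :: aParts rest

def redParts : List String → List String
  | [] => []
  | _ :: r => "[redacted]" :: aParts r

theorem loop_eq_aux : ∀ (n : Nat) (cmd : List String), cmd.length ≤ n → ∀ acc : List String,
    ((cmd.foldl displayCmdStep (acc, false)).1 = acc ++ aParts cmd) ∧
    ((cmd.foldl displayCmdStep (acc, true)).1 = acc ++ redParts cmd) := by
  intro n
  induction n with
  | zero =>
    intro cmd h acc
    have hc : cmd = [] := by cases cmd with
      | nil => rfl
      | cons p rest => simp at h
    subst hc; simp [aParts, redParts]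
  | succ n ih =>
    intro cmd h acc
    cases cmd with
    | nil => simp [aParts, redParts]
    | cons p rest =>
      constructor
      · by_cases hp : p = "--relay-token"
        · subst hp
          cases rest with
          | nil => simp [List.foldl, displayCmdStep, aParts]
          | cons q r =>
            have h2 := (ih (q :: r) (by simp at h ⊢; omega) (acc ++ ["--relay-token"])).2
            have e1 : displayCmdStep (acc, false) "--relay-token"
                = (acc ++ ["--relay-token"], true) := by simp [displayCmdStep]
            rw [List.foldl_cons, e1, h2]
            simp [aParts, redParts]
        · have h1 := (ih rest (by simp at h; omega) (acc ++ [p])).1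
          have e1 : displayCmdStep (acc, false) p = (acc ++ [p], false) := by
            simp [displayCmdStep, hp]
          rw [List.foldl_cons, e1, h1]
          conv_rhs => rw [aParts.eq_def]
          simp [hp]
      · have h1 := (ih rest (by simp at h; omega) (acc ++ ["[redacted]"])).1
        have e1 : displayCmdStep (acc, true) p = (acc ++ ["[redacted]"], false) := by
          simp [displayCmdStep]
        rw [List.foldl_cons, e1, h1]
        simp [redParts]

theorem runSplit_spec : ∀ l : List String,
    List.replicate (runSplit l).1 "--relay-token" ++ (runSplit l).2 = l := by
  intro l
  induction l with
  | nil => simp [runSplit]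
  | cons p rest ih =>
    by_cases h : p = "--relay-token"
    · subst h; simp [runSplit, List.replicate_succ]; exact ih
    · simp [runSplit, h]

-- aParts over a run of r tokens followed by an arbitrary tail
theorem aParts_run : ∀ (r : Nat) (tail : List String),
    aParts (List.replicate r "--relay-token" ++ tail) =
      pyListMul ["--relay-token", "[redacted]"] (r / 2) ++
        (if r % 2 == 1 then
          "--relay-token" ::
            (match tail with
             | [] => []
             | _ :: t => "[redacted]" :: aParts t)
         else aParts tail) := by
  intro r
  induction r using Nat.strong_induction_on with
  | _ r ih =>
    intro tail
    match r with
    | 0 => simp [pyListMul]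
    | 1 =>
      simp only [List.replicate, List.cons_append, List.nil_append]
      rw [aParts.eq_def]
      simp [pyListMul]
    | (n + 2) =>
      have h2 : (n + 2) / 2 = n / 2 + 1 := by omega
      have h3 : (n + 2) % 2 = n % 2 := by omega
      have step : aParts (List.replicate (n + 2) "--relay-token" ++ tail)
          = "--relay-token" :: "[redacted]" ::
              aParts (List.replicate n "--relay-token" ++ tail) := by
        simp only [List.replicate_succ, List.cons_append]
        rw [aParts.eq_def]
        simp
      rw [step, ih n (by omega) tail, h2, h3]
      simp [pyListMul, List.replicate_succ]

theorem altGo_eq_aParts : ∀ (n : Nat) (l : List String), l.length ≤ n → altGo l = aParts l := by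
  intro n
  induction n with
  | zero =>
    intro l h
    have hl : l = [] := by cases l with
      | nil => rfl
      | cons p rest => simp at h
    subst hl; simp [altGo, aParts]
  | succ n ih =>
    intro l h
    cases l with
    | nil => simp [altGo, aParts]
    | cons p rest =>
      by_cases hp : p = "--relay-token"
      · subst hp
        have hsplit := runSplit_spec rest
        have hlen := runSplit_len_le rest
        have hlrest : rest.length ≤ n := by simp at h; omega
        -- rewrite the cons as a run of (r+1) tokens followed by the remainder
        have hform : ("--relay-token" :: rest)
            = List.replicate ((runSplit rest).1 + 1) "--relay-token" ++ (runSplit rest).2 := by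
          rw [List.replicate_succ, List.cons_append, hsplit]
        rw [altGo.eq_def]
        simp only [beq_self_eq_true, if_true]
        conv_rhs => rw [hform, aParts_run]
        -- replace recursive altGo calls by aParts via the induction hypothesis
        congr 1
        by_cases hodd : ((runSplit rest).1 + 1) % 2 == 1
        · simp only [hodd, if_true]
          cases htail : (runSplit rest).2 with
          | nil => simp
          | cons q t =>
            have : t.length ≤ n := by
              have := runSplit_len_le rest
              rw [htail] at this
              simp at this; omega
            simp [ih t this]
        · simp only [hodd]
          exact ih (runSplit rest).2 (le_trans hlen hlrest)
      · rw [altGo.eq_def, aParts.eq_def]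
        simp only [beq_iff_eq, hp, if_false]
        have : rest.length ≤ n := by simp at h; omega
        rw [ih rest this]

-- ===== VERDICT (by name: the statement is the Claim_ definition above) =====
theorem display_cmd_spec : Claim_equal_display_cmd := by
  intro cmd _
  unfold Spec_display_cmd display_cmd display_cmd_alt
  rw [(loop_eq_aux cmd.length cmd le_rfl []).1, altGo_eq_aParts cmd.length cmd le_rfl]
  simp
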